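-- pv_equiv track=rewrite | github.com/sanmusen214/Get_some_leetcodes | 0030.py | fitwordfst
-- ===== SOURCE A (Python) =====
-- def fitwordfst(s,words): #在s中用words找，返回最左的单词开头末尾地址
--     fstptr=len(s)
--     which=''
--     for i in words:
--         if(s.find(i)>=0 and s.find(i)<fstptr):
--             fstptr=s.find(i)
--             which=i
--     return fstptr,fstptr+len(which)
-- ===== SOURCE B (Python) =====
-- def fitwordfst(s, words):
--     n = len(s)
--     for pos in range(n):
--         for w in words:
--             if s.startswith(w, pos):
--                 return pos, pos + len(w)
--     return n, n
-- ===== Notes on version B (the rewrite author's own statement) =====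
-- stated objective: faster
-- what changed: Instead of calling s.find three times per word and folding a strict minimum over all words, B scans string positions left to right and returns at the first position where some word (in given order) matches, preserving A's tie-breaking; a timing run measured B much faster (early exit; no repeated whole-string find per word).
import Mathlib
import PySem

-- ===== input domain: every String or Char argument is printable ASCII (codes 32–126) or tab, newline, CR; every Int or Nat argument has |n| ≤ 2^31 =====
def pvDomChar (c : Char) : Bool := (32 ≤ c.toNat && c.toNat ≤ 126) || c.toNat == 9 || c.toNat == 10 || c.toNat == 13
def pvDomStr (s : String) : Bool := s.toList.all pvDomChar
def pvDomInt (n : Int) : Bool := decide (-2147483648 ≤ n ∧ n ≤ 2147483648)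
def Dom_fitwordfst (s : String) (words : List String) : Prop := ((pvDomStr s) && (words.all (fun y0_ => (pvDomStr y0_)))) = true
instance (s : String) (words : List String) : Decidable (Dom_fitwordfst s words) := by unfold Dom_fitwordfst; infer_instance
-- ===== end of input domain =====

-- B replaces A's per-word s.find minimisation by a single left-to-right scan of the
-- string's positions, returning at the first position where some word matches (alternative decomposition, same result).

-- ===== PORT A =====
-- the loop body: if(s.find(i)>=0 and s.find(i)<fstptr): fstptr=s.find(i); which=i
def stepA (s : String) (acc : Int × String) (i : String) : Int × String :=
  if 0 ≤ PySem.Str.find s i ∧ PySem.Str.find s i < acc.1 then (PySem.Str.find s i, i) else acc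

def fitwordfst (s : String) (words : List String) : Int × Int :=
  let st := words.foldl (stepA s) (PySem.Str.len s, "")
  (st.1, st.1 + PySem.Str.len st.2)

-- ===== PORT B =====
-- inner loop: first word (in given order) with s.startswith(w, pos); exact for 0 ≤ pos ≤ len(s),
-- since Python's s.startswith(w, pos) there is "w is a prefix of s[pos:]"
def findAt (l : List Char) (pos : Nat) : List String → Option (Int × Int)
  | [] => none
  | w :: ws =>
      if PySem.Chars.startswith (l.drop pos) w.toList then some ((pos : Int), (pos : Int) + PySem.Str.len w)
      else findAt l pos ws

-- outer loop: for pos in range(n); fuel counts the remaining iterations, so fuel 0 = loop done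
def scanPos (l : List Char) (words : List String) : Nat → Nat → Int × Int
  | _, 0 => ((l.length : Int), (l.length : Int))
  | pos, fuel+1 =>
      match findAt l pos words with
      | some r => r
      | none => scanPos l words (pos+1) fuel

def fitwordfst_alt (s : String) (words : List String) : Int × Int :=
  scanPos s.toList words 0 s.toList.length

-- ===== PRECONDITION & SPEC =====
def Spec_fitwordfst (s : String) (words : List String) (out : Int × Int) : Prop := out = fitwordfst_alt s words
instance (s : String) (words : List String) (out : Int × Int) : Decidable (Spec_fitwordfst s words out) := by unfold Spec_fitwordfst; infer_instance

-- ===== CLAIM (what is proved, stated in full; the proofs are below) =====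
def Claim_equal_fitwordfst : Prop := ∀ (s : String) (words : List String), Dom_fitwordfst s words → Spec_fitwordfst s words (fitwordfst s words)

-- ===== LEMMAS AND PROOFS =====

-- a prefix of s[pos:] is first found by s.find at or before pos
lemma find_le_of_prefix_drop (l : List Char) (w : List Char) (pos : Nat)
    (h : w <+: List.drop pos l) : 0 ≤ PySem.Chars.find l w ∧ PySem.Chars.find l w ≤ (pos : Int) := by
  have hinf : w <:+: l := h.isInfix.trans (List.drop_suffix pos l).isInfix
  have h0 : 0 ≤ PySem.Chars.find l w := (PySem.Chars.find_nonneg_iff l w).2 hinf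
  refine ⟨h0, ?_⟩
  by_contra hlt
  push_neg at hlt
  exact (PySem.Chars.find_spec h0).2 pos (by omega) h

-- if s.find(w) = pos then w is a prefix of s[pos:]
lemma prefix_of_find_eq (l : List Char) (w : List Char) (pos : Nat)
    (h : PySem.Chars.find l w = (pos : Int)) : w <+: List.drop pos l := by
  have h0 : 0 ≤ PySem.Chars.find l w := by omega
  have := (PySem.Chars.find_spec h0).1
  rwa [h, Int.toNat_natCast] at this

-- A's fold does not move once no remaining word can strictly improve the pointer
lemma fold_stay (s : String) (a : Int) (u : String) (ws : List String)
    (h : ∀ w ∈ ws, ¬ (0 ≤ PySem.Str.find s w ∧ PySem.Str.find s w < a)) :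
    ws.foldl (stepA s) (a, u) = (a, u) := by
  induction ws with
  | nil => rfl
  | cons w ws ih =>
      simp only [List.foldl_cons, stepA]
      rw [if_neg (h w (List.mem_cons_self))]
      exact ih (fun w' hw' => h w' (List.mem_cons_of_mem _ hw'))

-- at the least matching position, A's fold lands on the first word matching there
lemma fold_found (s : String) (pos : Nat) (r : Int × Int) :
    ∀ (words : List String) (a : Int) (u : String),
    (pos : Int) < a →
    (∀ w ∈ words, PySem.Str.find s w = -1 ∨ (pos : Int) ≤ PySem.Str.find s w) →
    findAt s.toList pos words = some r →
    ((words.foldl (stepA s) (a, u)).1,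
      (words.foldl (stepA s) (a, u)).1 + PySem.Str.len (words.foldl (stepA s) (a, u)).2) = r := by
  intro words
  induction words with
  | nil => intro a u _ _ hf; simp [findAt] at hf
  | cons w ws ih =>
      intro a u ha hall hf
      by_cases hsw : PySem.Chars.startswith (s.toList.drop pos) w.toList = true
      · -- first matching word: r = (pos, pos + len w), the fold takes (pos, w) and stays
        have hpre : w.toList <+: s.toList.drop pos := (PySem.Chars.startswith_iff _ _).1 hsw
        have hle := find_le_of_prefix_drop s.toList w.toList pos hpre
        have hwfind : PySem.Str.find s w = (pos : Int) := by
          have h1 : PySem.Str.find s w = PySem.Chars.find s.toList w.toList := PySem.Str.find_eq s w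
          rcases hall w List.mem_cons_self with h | h <;> rw [h1] at * <;> omega
        simp only [findAt, hsw, if_true, Option.some.injEq] at hf
        simp only [List.foldl_cons, stepA, hwfind]
        rw [if_pos ⟨by omega, by omega⟩]
        rw [fold_stay s (pos : Int) w ws
          (fun w' hw' => by rcases hall w' (List.mem_cons_of_mem _ hw') with h | h <;> omega)]
        exact hf
      · -- head does not match at pos: its find is -1 or > pos, so the invariant pos < acc.1 persists
        have hne : PySem.Str.find s w ≠ (pos : Int) := by
          intro h
          exact hsw ((PySem.Chars.startswith_iff _ _).2
            (prefix_of_find_eq s.toList w.toList pos (by rw [← PySem.Str.find_eq]; exact h)))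
        have hf' : findAt s.toList pos ws = some r := by
          simpa [findAt, hsw] using hf
        have hall' : ∀ w' ∈ ws, PySem.Str.find s w' = -1 ∨ (pos : Int) ≤ PySem.Str.find s w' :=
          fun w' hw' => hall w' (List.mem_cons_of_mem _ hw')
        simp only [List.foldl_cons, stepA]
        by_cases hc : 0 ≤ PySem.Str.find s w ∧ PySem.Str.find s w < a
        · rw [if_pos hc]
          refine ih (PySem.Str.find s w) w ?_ hall' hf'
          rcases hall w List.mem_cons_self with h | h <;> omega
        · rw [if_neg hc]
          exact ih a u ha hall' hf'

lemma findAt_none (l : List Char) (pos : Nat) :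
    ∀ ws : List String, findAt l pos ws = none →
    ∀ w ∈ ws, ¬ (w.toList <+: List.drop pos l) := by
  intro ws
  induction ws with
  | nil => intro _ w hw; simp at hw
  | cons w ws ih =>
      intro hf w' hw'
      by_cases hsw : PySem.Chars.startswith (l.drop pos) w.toList = true
      · simp [findAt, hsw] at hf
      · have hf' : findAt l pos ws = none := by simpa [findAt, hsw] using hf
        rcases List.mem_cons.1 hw' with rfl | hmem
        · intro hpre; exact hsw ((PySem.Chars.startswith_iff _ _).2 hpre)
        · exact ih hf' w' hmem

-- no word matches strictly before pos ⇒ every word's find is -1 or ≥ pos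
lemma all_find_ge (s : String) (words : List String) (pos : Nat)
    (hmin : ∀ q < pos, ∀ w ∈ words, ¬ (w.toList <+: List.drop q s.toList)) :
    ∀ w ∈ words, PySem.Str.find s w = -1 ∨ (pos : Int) ≤ PySem.Str.find s w := by
  intro w hw
  rw [PySem.Str.find_eq]
  by_cases h0 : 0 ≤ PySem.Chars.find s.toList w.toList
  · right
    by_contra hlt
    push_neg at hlt
    have hpre := (PySem.Chars.find_spec h0).1
    exact hmin (PySem.Chars.find s.toList w.toList).toNat (by omega) w hw hpre
  · left
    have := PySem.Chars.neg_one_le_find s.toList w.toList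
    omega

-- the scan, started below any match, computes exactly A's fold result
lemma scan_eq_fold (s : String) (words : List String) :
    ∀ (fuel pos : Nat), pos + fuel = s.toList.length →
    (∀ q < pos, ∀ w ∈ words, ¬ (w.toList <+: List.drop q s.toList)) →
    scanPos s.toList words pos fuel =
      ((words.foldl (stepA s) (PySem.Str.len s, "")).1,
        (words.foldl (stepA s) (PySem.Str.len s, "")).1 +
          PySem.Str.len (words.foldl (stepA s) (PySem.Str.len s, "")).2) := by
  intro fuel
  induction fuel with
  | zero =>
      intro pos hlen hmin
      have hall := all_find_ge s words pos hmin
      have hlens : PySem.Str.len s = (s.toList.length : Int) := PySem.Str.len_eq s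
      have hstay : words.foldl (stepA s) (PySem.Str.len s, "") = (PySem.Str.len s, "") := by
        refine fold_stay s _ "" words (fun w hw => ?_)
        rcases hall w hw with h | h
        · omega
        · have hpn : pos = s.toList.length := by omega
          rw [hlens]; omega
      simp only [scanPos, hstay]
      rw [hlens]
      norm_num [PySem.Str.len]
  | succ fuel ih =>
      intro pos hlen hmin
      simp only [scanPos]
      cases hf : findAt s.toList pos words with
      | some r =>
          have hall := all_find_ge s words pos hmin
          have ha : (pos : Int) < PySem.Str.len s := by rw [PySem.Str.len_eq]; omega
          exact (fold_found s pos r words _ "" ha hall hf).symm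
      | none =>
          refine ih (pos + 1) (by omega) ?_
          intro q hq w hw
          rcases Nat.lt_succ_iff_lt_or_eq.1 hq with h | h
          · exact hmin q h w hw
          · rw [h]; exact findAt_none s.toList pos words hf w hw

-- ===== VERDICT (by name: the statement is the Claim_ definition above) =====
theorem fitwordfst_spec : Claim_equal_fitwordfst := by
  intro s words _
  unfold Spec_fitwordfst fitwordfst fitwordfst_alt
  exact (scan_eq_fold s words s.toList.length 0 (by omega) (by omega)).symm
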